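-- pv_equiv track=rewrite | github.com/hexbee/langchain-langgraph-deepagents-demo | skills_support.py | _validate_skill_name
-- ===== SOURCE A (Python) =====
-- MAX_SKILL_NAME_LENGTH = 64
--
-- def _validate_skill_name(name: str, directory_name: str) -> tuple[bool, str]:
--     if not name:
--         return False, "name is required"
--     if len(name) > MAX_SKILL_NAME_LENGTH:
--         return False, "name exceeds 64 characters"
--     if name.startswith("-") or name.endswith("-") or "--" in name:
--         return False, "name must be lowercase alphanumeric with single hyphens only"
--     for char in name:
--         if char == "-":
--             continue
--         if (char.isalpha() and char.islower()) or char.isdigit():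
--             continue
--         return False, "name must be lowercase alphanumeric with single hyphens only"
--     if name != directory_name:
--         return False, f"name '{name}' must match directory name '{directory_name}'"
--     return True, ""
-- ===== SOURCE B (Python) =====
-- MAX_SKILL_NAME_LENGTH = 64
--
--
-- def _segment_ok(seg):
--     return all((c.isalpha() and c.islower()) or c.isdigit() for c in seg)
--
--
-- def _first_error(name, directory_name):
--     # returns the error message, or None if the name is valid
--     if not name:
--         return "name is required"
--     if len(name) > MAX_SKILL_NAME_LENGTH:
--         return "name exceeds 64 characters"
--     segments = name.split("-")
--     if any(seg == "" or not _segment_ok(seg) for seg in segments):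
--         # an empty segment means a leading/trailing hyphen or '--'
--         return "name must be lowercase alphanumeric with single hyphens only"
--     if name != directory_name:
--         return f"name '{name}' must match directory name '{directory_name}'"
--     return None
--
--
-- def _validate_skill_name(name: str, directory_name: str) -> tuple[bool, str]:
--     error = _first_error(name, directory_name)
--     return (error is None, "" if error is None else error)
-- ===== Notes on version B (the rewrite author's own statement) =====
-- stated objective: alternative
-- what changed: A's startswith/endswith/'--'-substring checks plus a separate character loop are replaced by splitting the name on '-' and validating the segments (empty segment = bad hyphen structure), and the function is decomposed into an error-computing helper returning Optional[str] whose result is turned into the (bool, str) pair.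
import Mathlib
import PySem

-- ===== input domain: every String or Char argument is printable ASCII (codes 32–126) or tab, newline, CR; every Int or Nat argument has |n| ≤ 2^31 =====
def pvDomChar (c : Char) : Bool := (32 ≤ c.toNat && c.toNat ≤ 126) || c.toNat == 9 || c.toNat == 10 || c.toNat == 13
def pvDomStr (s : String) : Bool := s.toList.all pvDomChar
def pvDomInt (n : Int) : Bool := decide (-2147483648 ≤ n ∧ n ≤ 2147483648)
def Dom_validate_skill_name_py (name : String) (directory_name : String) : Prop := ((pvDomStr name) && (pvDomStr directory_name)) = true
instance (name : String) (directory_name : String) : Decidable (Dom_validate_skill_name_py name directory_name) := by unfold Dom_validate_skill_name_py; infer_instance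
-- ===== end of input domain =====

-- B validates the name by splitting it on '-' and checking the segments (an empty segment
-- means a leading/trailing hyphen or '--'), with the whole check decomposed into a helper
-- returning the first error as an Option (objective: alternative).

-- ===== PORT A =====
-- A's character loop: returns false exactly when A's `for char in name` loop hits its early return
def aCharLoop : List Char → Bool
  | [] => true
  | c :: rest =>
    if c = '-' then aCharLoop rest
    else if (PySem.Chars.isalpha c && PySem.Chars.islower c) || PySem.Chars.isdigit c then
      aCharLoop rest
    else false

def validate_skill_name_py (name : String) (directory_name : String) : Bool × String :=
  if name = "" then (false, "name is required")
  else if 64 < PySem.Str.len name then (false, "name exceeds 64 characters")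
  else if PySem.Str.startswith name "-" || PySem.Str.endswith name "-" || PySem.Str.isIn "--" name then
    (false, "name must be lowercase alphanumeric with single hyphens only")
  else if aCharLoop name.toList = false then
    (false, "name must be lowercase alphanumeric with single hyphens only")
  else if name ≠ directory_name then
    (false, "name '" ++ name ++ "' must match directory name '" ++ directory_name ++ "'")
  else (true, "")

-- ===== PORT B =====
-- Source B's _segment_ok: all characters of one hyphen-free segment are lowercase letters or digits
def segmentOk (seg : List Char) : Bool :=
  seg.all (fun c => (PySem.Chars.isalpha c && PySem.Chars.islower c) || PySem.Chars.isdigit c)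

-- Source B's _first_error: the first error message, or none if the name is valid
-- (name.split("-") is ported as List.splitOn '-' on the character list)
def firstError (name : String) (directory_name : String) : Option String :=
  if name = "" then some "name is required"
  else if 64 < PySem.Str.len name then some "name exceeds 64 characters"
  else if (List.splitOn '-' name.toList).any (fun seg => seg.isEmpty || !segmentOk seg) then
    some "name must be lowercase alphanumeric with single hyphens only"
  else if name ≠ directory_name then
    some ("name '" ++ name ++ "' must match directory name '" ++ directory_name ++ "'")
  else none

def validate_skill_name_py_alt (name : String) (directory_name : String) : Bool × String :=
  match firstError name directory_name with
  | none => (true, "")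
  | some e => (false, e)

-- ===== PRECONDITION & SPEC =====
def Spec_validate_skill_name_py (name : String) (directory_name : String) (out : Bool × String) : Prop := out = validate_skill_name_py_alt name directory_name
instance (name : String) (directory_name : String) (out : Bool × String) : Decidable (Spec_validate_skill_name_py name directory_name out) := by unfold Spec_validate_skill_name_py; infer_instance

-- ===== CLAIM (what is proved, stated in full; the proofs are below) =====
def Claim_equal_validate_skill_name_py : Prop := ∀ (name : String) (directory_name : String), Dom_validate_skill_name_py name directory_name → Spec_validate_skill_name_py name directory_name (validate_skill_name_py name directory_name)

-- ===== LEMMAS AND PROOFS =====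

-- proof-side intermediate: a single-pass scan tracking the previous character, used to
-- bridge B's segment check and A's four guards
def bScan (prev : Char) : List Char → Bool
  | [] => prev != '-'
  | c :: rest =>
    if c = '-' then
      if prev = '-' then false else bScan c rest
    else if (PySem.Chars.isalpha c && PySem.Chars.islower c) || PySem.Chars.isdigit c then
      bScan c rest
    else false

-- B's segment check agrees with the scan (second conjunct: the scan inside a segment,
-- i.e. with a non-hyphen previous character, checks the current segment's remainder
-- followed by the later segments)
lemma split_all_eq_bScan (l : List Char) :
    ((List.splitOnP (· == '-') l).all (fun seg => !seg.isEmpty && segmentOk seg) = bScan '-' l) ∧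
    (∀ prev, prev ≠ '-' →
      (match List.splitOnP (· == '-') l with
       | [] => true
       | s :: ss => segmentOk s && ss.all (fun seg => !seg.isEmpty && segmentOk seg)) = bScan prev l) := by
  induction l with
  | nil =>
    constructor
    · simp [List.splitOnP_nil, bScan, segmentOk]
    · intro prev hp
      simp [List.splitOnP_nil, bScan, segmentOk, hp]
  | cons c rest ih =>
    by_cases hc : c = '-'
    · subst hc
      constructor
      · simp [List.splitOnP_cons, bScan]
      · intro prev hp
        simp only [List.splitOnP_cons]
        simp only [beq_self_eq_true, if_true]
        have : bScan prev ('-'::rest) = bScan '-' rest := by simp [bScan, hp]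
        rw [this, ← ih.1]
        simp [segmentOk]
    · by_cases hok : ((PySem.Chars.isalpha c && PySem.Chars.islower c) || PySem.Chars.isdigit c) = true
      · obtain ⟨s, ss, hsplit⟩ : ∃ s ss, List.splitOnP (· == '-') rest = s :: ss := by
          cases h : List.splitOnP (· == '-') rest with
          | nil => exact absurd h (List.splitOnP_ne_nil _ _)
          | cons a b => exact ⟨a, b, rfl⟩
        have hsc : List.splitOnP (· == '-') (c::rest) = (c :: s) :: ss := by
          simp [List.splitOnP_cons, hc, hsplit]
        have hseg : segmentOk (c :: s) = segmentOk s := by simp [segmentOk, hok]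
        have hrest := ih.2 c hc
        rw [hsplit] at hrest
        have hrest' : (segmentOk s && ss.all (fun seg => !seg.isEmpty && segmentOk seg)) = bScan c rest := hrest
        have hstep : ∀ prev, bScan prev (c::rest) = bScan c rest := by
          intro prev; simp [bScan, hc, hok]
        constructor
        · rw [hsc, hstep, ← hrest']
          simp [hseg]
        · intro prev hp
          rw [hsc]
          show (segmentOk (c :: s) && ss.all (fun seg => !seg.isEmpty && segmentOk seg)) = bScan prev (c::rest)
          rw [hseg, hstep, ← hrest']
      · have hsc : ∀ prev, bScan prev (c::rest) = false := by
          intro prev; simp [bScan, hc, hok]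
        obtain ⟨s, ss, hsplit⟩ : ∃ s ss, List.splitOnP (· == '-') rest = s :: ss := by
          cases h : List.splitOnP (· == '-') rest with
          | nil => exact absurd h (List.splitOnP_ne_nil _ _)
          | cons a b => exact ⟨a, b, rfl⟩
        have hs : List.splitOnP (· == '-') (c::rest) = (c :: s) :: ss := by
          simp [List.splitOnP_cons, hc, hsplit]
        have hsegf : segmentOk (c :: s) = false := by simp [segmentOk, hok]
        constructor
        · rw [hs, hsc]; simp [hsegf]
        · intro prev hp; rw [hs, hsc]; simp [hsegf]

lemma singleton_prefix_iff_head? (a : Char) (l : List Char) : [a] <+: l ↔ l.head? = some a := by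
  cases l <;> simp [List.cons_prefix_cons, eq_comm]

lemma bScan_spec (l : List Char) (prev : Char) :
    bScan prev l = true ↔
      ((prev = '-' → l.head? ≠ some '-') ∧ ¬ ['-', '-'] <:+: l ∧ aCharLoop l = true ∧
        l.getLastD prev ≠ '-') := by
  induction l generalizing prev with
  | nil => simp [bScan, aCharLoop]
  | cons c rest ih =>
    by_cases hc : c = '-'
    · subst hc
      by_cases hp : prev = '-'
      · subst hp
        simp [bScan]
      · have hstep : bScan prev ('-'::rest) = bScan '-' rest := by
          simp [bScan, hp]
        rw [hstep, ih]
        have htwo : (['-', '-'] <:+: '-'::rest) ↔ (rest.head? = some '-' ∨ ['-','-'] <:+: rest) := by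
          rw [List.infix_cons_iff, List.cons_prefix_cons, singleton_prefix_iff_head?]
          tauto
        have haL : aCharLoop ('-'::rest) = aCharLoop rest := by simp [aCharLoop]
        rw [haL, htwo, List.getLastD_cons]
        constructor
        · rintro ⟨h1, h2, h3, h4⟩
          exact ⟨fun h => absurd h hp, fun h => h.elim (h1 rfl) h2, h3, h4⟩
        · rintro ⟨_, h2, h3, h4⟩
          exact ⟨fun _ h => h2 (Or.inl h), fun h => h2 (Or.inr h), h3, h4⟩
    · by_cases hok : ((PySem.Chars.isalpha c && PySem.Chars.islower c) || PySem.Chars.isdigit c) = true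
      · have hstep : bScan prev (c::rest) = bScan c rest := by
          simp [bScan, hc, hok]
        have htwo : (['-', '-'] <:+: c::rest) ↔ (['-','-'] <:+: rest) := by
          rw [List.infix_cons_iff, List.cons_prefix_cons]
          simp [Ne.symm hc]
        have haL : aCharLoop (c::rest) = aCharLoop rest := by simp [aCharLoop, hc, hok]
        rw [hstep, ih, haL, htwo, List.getLastD_cons]
        constructor
        · rintro ⟨_, h2, h3, h4⟩
          exact ⟨fun _ h => hc (Option.some.inj h), h2, h3, h4⟩
        · rintro ⟨_, h2, h3, h4⟩
          exact ⟨fun h => absurd h hc, h2, h3, h4⟩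
      · have hstep : bScan prev (c::rest) = false := by
          simp [bScan, hc, hok]
        have haL : aCharLoop (c::rest) = false := by simp [aCharLoop, hc, hok]
        rw [hstep, haL]
        simp

lemma singleton_suffix_iff_getLast? (a : Char) (l : List Char) : [a] <:+ l ↔ l.getLast? = some a := by
  rw [← List.reverse_prefix, List.reverse_cons, List.reverse_nil, List.nil_append,
    ← List.head?_reverse]
  exact singleton_prefix_iff_head? a l.reverse

-- for a nonempty name, the scan fails exactly when A's third or fourth guard fires
lemma bScan_false_iff (name : String) (hl : name.toList ≠ []) :
    bScan '-' name.toList = false ↔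
      ((PySem.Str.startswith name "-" || PySem.Str.endswith name "-" ||
        PySem.Str.isIn "--" name) = true ∨ aCharLoop name.toList = false) := by
  rw [← Bool.not_eq_true, bScan_spec, List.getLastD_eq_getLast?]
  simp only [PySem.Str.startswith, PySem.Str.endswith, PySem.Str.isIn]
  have hm : ("-" : String).toList = ['-'] := rfl
  have hmm : ("--" : String).toList = ['-', '-'] := rfl
  rw [hm, hmm]
  simp only [PySem.Chars.startswith, PySem.Chars.endswith, Bool.or_eq_true]
  rw [List.isPrefixOf_iff_prefix, List.isSuffixOf_iff_suffix,
    singleton_prefix_iff_head?, singleton_suffix_iff_getLast?,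
    PySem.Chars.isIn_iff_infix ['-', '-'] name.toList]
  constructor
  · intro h
    by_cases h1 : name.toList.head? = some '-'
    · exact Or.inl (Or.inl (Or.inl h1))
    · by_cases h2 : ['-', '-'] <:+: name.toList
      · exact Or.inl (Or.inr h2)
      · by_cases h3 : aCharLoop name.toList = true
        · refine Or.inl (Or.inl (Or.inr ?_))
          by_cases h4 : name.toList.getLast? = some '-'
          · exact h4
          · exact absurd ⟨fun _ => h1, h2, h3, by
              cases hg : name.toList.getLast? with
              | none => exact absurd (List.getLast?_eq_none_iff.mp hg) hl
              | some x =>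
                intro hx
                simp only [Option.getD_some] at hx
                exact h4 (by rw [hg, hx])⟩ h
        · exact Or.inr (Bool.not_eq_true _ |>.mp h3)
  · rintro (((h1 | h2) | h3) | h4) ⟨g1, g2, g3, g4⟩
    · exact g1 trivial h1
    · exact g4 (by rw [h2, Option.getD_some])
    · exact g2 h3
    · rw [g3] at h4; exact absurd h4 (by simp)

-- B's any-bad-segment guard fires exactly when the scan fails
lemma split_any_iff (l : List Char) :
    ((List.splitOn '-' l).any (fun seg => seg.isEmpty || !segmentOk seg) = true) ↔
      bScan '-' l = false := by
  have h := (split_all_eq_bScan l).1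
  rw [List.splitOn] at *
  constructor
  · intro ha
    rw [← h]
    simp only [List.any_eq_true] at ha
    obtain ⟨seg, hm, hseg⟩ := ha
    apply List.all_eq_false.mpr
    refine ⟨seg, hm, ?_⟩
    simp only [Bool.or_eq_true, Bool.not_eq_true', List.isEmpty_iff] at hseg
    rcases hseg with h1 | h2
    · simp [h1, segmentOk]
    · simp [h2]
  · intro hb
    rw [← h] at hb
    by_contra hna
    simp only [List.any_eq_true, not_exists, not_and] at hna
    have : (List.splitOnP (· == '-') l).all (fun seg => !seg.isEmpty && segmentOk seg) = true := by
      simp only [List.all_eq_true]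
      intro seg hm
      have := hna seg hm
      simp only [Bool.or_eq_true, Bool.not_eq_true', not_or, Bool.not_eq_false] at this
      simp [this.1, this.2]
    rw [this] at hb; exact absurd hb (by simp)

-- ===== VERDICT (by name: the statement is the Claim_ definition above) =====
theorem validate_skill_name_py_spec : Claim_equal_validate_skill_name_py := by
  intro name directory_name _
  unfold Spec_validate_skill_name_py validate_skill_name_py validate_skill_name_py_alt firstError
  by_cases h0 : name = ""
  · simp [h0]
  · rw [if_neg h0, if_neg h0]
    by_cases h64 : 64 < PySem.Str.len name
    · rw [if_pos h64, if_pos h64]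
    · rw [if_neg h64, if_neg h64]
      have hl : name.toList ≠ [] := by
        intro hh
        exact h0 (String.toList_eq_nil_iff.mp hh)
      have key := (split_any_iff name.toList).trans (bScan_false_iff name hl)
      by_cases h3 : (PySem.Str.startswith name "-" || PySem.Str.endswith name "-" ||
          PySem.Str.isIn "--" name) = true
      · rw [if_pos h3, if_pos (key.mpr (Or.inl h3))]
      · rw [if_neg h3]
        by_cases h4 : aCharLoop name.toList = false
        · rw [if_pos h4, if_pos (key.mpr (Or.inr h4))]
        · rw [if_neg h4, if_neg (fun hb => (h3 ((key.mp hb).resolve_right h4)))]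
          by_cases h5 : name ≠ directory_name
          · rw [if_pos h5, if_pos h5]
          · rw [if_neg h5, if_neg h5]
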